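-- pv_equiv track=rewrite | github.com/Malkovsky/pixie | scripts/draw_bp_representation.py | _normalize_louds
-- ===== SOURCE A (Python) =====
-- def _normalize_louds(text: str) -> tuple[str, str]:
--     filtered = "".join(ch for ch in text if not ch.isspace())
--     if not filtered:
--         raise ValueError("sequence is empty")
--
--     if all(ch in "01" for ch in filtered):
--         return filtered, filtered
--     if all(ch in "()" for ch in filtered):
--         bits = "".join("1" if ch == "(" else "0" for ch in filtered)
--         return bits, filtered
--
--     invalid = sorted({ch for ch in filtered if ch not in "01()"})
--     if invalid:
--         chars = ", ".join(repr(ch) for ch in invalid)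
--         raise ValueError(f"LOUDS sequence contains invalid characters: {chars}")
--     raise ValueError("LOUDS sequence must use either only '0/1' or only '(' and ')' tokens")
-- ===== SOURCE B (Python) =====
-- def _normalize_louds(text: str) -> tuple[str, str]:
--     # single pass: build filtered and bits together while classifying characters
--     filtered = []
--     bits = []
--     seen_bit = False
--     seen_br = False
--     invalid = set()
--     for ch in text:
--         if ch.isspace():
--             continue
--         filtered.append(ch)
--         if ch == "0" or ch == "1":
--             seen_bit = True
--             bits.append(ch)
--         elif ch == "(":
--             seen_br = True
--             bits.append("1")
--         elif ch == ")":
--             seen_br = True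
--             bits.append("0")
--         else:
--             invalid.add(ch)
--     if not filtered:
--         raise ValueError("sequence is empty")
--     if invalid:
--         chars = ", ".join(repr(ch) for ch in sorted(invalid))
--         raise ValueError(f"LOUDS sequence contains invalid characters: {chars}")
--     if seen_bit and seen_br:
--         raise ValueError("LOUDS sequence must use either only '0/1' or only '(' and ')' tokens")
--     return "".join(bits), "".join(filtered)
-- ===== Notes on version B (the rewrite author's own statement) =====
-- stated objective: alternative
-- what changed: B replaces A's three separate full scans of the filtered string (two all() membership scans plus a set-comprehension scan for invalid characters) with one single fold over the raw text that simultaneously builds the filtered string, the bit string and the classification flags, deciding the outcome from the accumulated state afterwards.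
import Mathlib
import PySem

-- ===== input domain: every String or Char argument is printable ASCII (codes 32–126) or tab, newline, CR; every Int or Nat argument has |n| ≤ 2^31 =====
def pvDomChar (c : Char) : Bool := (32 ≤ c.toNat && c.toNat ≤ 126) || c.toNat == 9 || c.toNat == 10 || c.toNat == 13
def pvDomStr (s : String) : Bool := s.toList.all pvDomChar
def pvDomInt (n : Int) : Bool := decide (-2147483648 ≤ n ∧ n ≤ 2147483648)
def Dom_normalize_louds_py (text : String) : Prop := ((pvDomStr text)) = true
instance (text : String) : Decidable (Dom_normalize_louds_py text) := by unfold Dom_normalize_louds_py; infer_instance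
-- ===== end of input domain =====

-- B makes the normalization a single fold over the text instead of A's repeated full scans; same results.
-- On inputs outside Pre_ the Python A raises ValueError (and so does B); the ports return ("","") there, nothing is claimed.

-- ===== PORT A =====
-- literal transliteration of A: filter whitespace, then three separate scans of the filtered list
def normalize_louds_py (text : String) : String × String :=
  let filtered := text.toList.filter (fun ch => !(PySem.Chars.isspace ch))
  if filtered = [] then ("", "")   -- raise ValueError("sequence is empty")
  else if filtered.all (fun ch => ch == '0' || ch == '1') then
    (String.ofList filtered, String.ofList filtered)
  else if filtered.all (fun ch => ch == '(' || ch == ')') then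
    (String.ofList (filtered.map (fun ch => if ch == '(' then '1' else '0')), String.ofList filtered)
  else ("", "")                    -- both remaining paths raise ValueError

-- ===== PORT B =====
-- literal transliteration of B's single-pass loop body
def loudsStep (st : List Char × List Char × Bool × Bool × PySem.Set Char) (ch : Char) :
    List Char × List Char × Bool × Bool × PySem.Set Char :=
  match st with
  | (filtered, bits, seenBit, seenBr, invalid) =>
    if PySem.Chars.isspace ch then (filtered, bits, seenBit, seenBr, invalid)
    else if ch == '0' || ch == '1' then (filtered ++ [ch], bits ++ [ch], true, seenBr, invalid)
    else if ch == '(' then (filtered ++ [ch], bits ++ ['1'], seenBit, true, invalid)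
    else if ch == ')' then (filtered ++ [ch], bits ++ ['0'], seenBit, true, invalid)
    else (filtered ++ [ch], bits, seenBit, seenBr, invalid.add ch)

def normalize_louds_py_alt (text : String) : String × String :=
  match text.toList.foldl loudsStep ([], [], false, false, PySem.Set.ofList []) with
  | (filtered, bits, seenBit, seenBr, invalid) =>
    if filtered = [] then ("", "")               -- raise ValueError("sequence is empty")
    else if invalid ≠ [] then ("", "")           -- raise ValueError(invalid characters)
    else if seenBit && seenBr then ("", "")      -- raise ValueError(mixed tokens)
    else (String.ofList bits, String.ofList filtered)

-- ===== PRECONDITION & SPEC =====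
-- Pre_ admits exactly the inputs on which A returns: after dropping whitespace the text is
-- nonempty and uses only '0'/'1' or only '('/')' — everywhere else A raises ValueError.
def Pre_normalize_louds_py (text : String) : Prop :=
  let f := text.toList.filter (fun ch => !(PySem.Chars.isspace ch))
  f ≠ [] ∧ (f.all (fun ch => ch == '0' || ch == '1') = true ∨
            f.all (fun ch => ch == '(' || ch == ')') = true)
instance (text : String) : Decidable (Pre_normalize_louds_py text) := by
  unfold Pre_normalize_louds_py; infer_instance
def pvWitness_normalize_louds_py : String := "10 110"
def Spec_normalize_louds_py (text : String) (out : String × String) : Prop := out = normalize_louds_py_alt text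
instance (text : String) (out : String × String) : Decidable (Spec_normalize_louds_py text out) := by unfold Spec_normalize_louds_py; infer_instance

-- ===== CLAIM (what is proved, stated in full; the proofs are below) =====
def Claim_equal_normalize_louds_py : Prop := ∀ (text : String), Dom_normalize_louds_py text → Pre_normalize_louds_py text → Spec_normalize_louds_py text (normalize_louds_py text)

-- ===== LEMMAS AND PROOFS =====


-- characterization of B's fold: components in terms of the filtered character list
def pvBitsOf (F : List Char) : List Char :=
  F.filterMap (fun c => if c == '0' || c == '1' then some c
               else if c == '(' then some '1' else if c == ')' then some '0' else none)

lemma louds_fold (l : List Char) (f b : List Char) (sb sr : Bool) (inv : PySem.Set Char) :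
    l.foldl loudsStep (f, b, sb, sr, inv) =
      (f ++ l.filter (fun c => !(PySem.Chars.isspace c)),
       b ++ pvBitsOf (l.filter (fun c => !(PySem.Chars.isspace c))),
       sb || (l.filter (fun c => !(PySem.Chars.isspace c))).any (fun c => c == '0' || c == '1'),
       sr || (l.filter (fun c => !(PySem.Chars.isspace c))).any (fun c => c == '(' || c == ')'),
       ((l.filter (fun c => !(PySem.Chars.isspace c))).filter
          (fun c => !(c == '0' || c == '1' || c == '(' || c == ')'))).foldl PySem.Set.add inv) := by
  induction l generalizing f b sb sr inv with
  | nil => simp [pvBitsOf]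
  | cons c t ih =>
    by_cases hs : PySem.Chars.isspace c
    · simp [List.foldl, loudsStep, hs, ih]
    · by_cases h0 : c = '0'
      · subst h0; simp [List.foldl, loudsStep, hs, ih, pvBitsOf, Bool.or_assoc]
      · by_cases h1 : c = '1'
        · subst h1; simp [List.foldl, loudsStep, hs, ih, pvBitsOf, Bool.or_assoc]
        · by_cases hl : c = '('
          · subst hl; simp [List.foldl, loudsStep, hs, ih, pvBitsOf, Bool.or_assoc]
          · by_cases hr : c = ')'
            · subst hr; simp [List.foldl, loudsStep, hs, ih, pvBitsOf, Bool.or_assoc]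
            · have hb : (c == '0' || c == '1') = false := by simp [h0, h1]
              have hb2 : (c == '(' || c == ')') = false := by simp [hl, hr]
              simp [List.foldl, loudsStep, hs, h0, h1, hl, hr, hb, hb2, ih, pvBitsOf]

lemma bits_of_all_bits (F : List Char) (h : F.all (fun c => c == '0' || c == '1') = true) :
    pvBitsOf F = F := by
  induction F with
  | nil => rfl
  | cons c t ih =>
    simp only [List.all_cons, Bool.and_eq_true] at h
    have hc : c = '0' ∨ c = '1' := by simpa using h.1
    rcases hc with hc | hc <;> subst hc
    · rw [show pvBitsOf ('0' :: t) = '0' :: pvBitsOf t from rfl, ih h.2]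
    · rw [show pvBitsOf ('1' :: t) = '1' :: pvBitsOf t from rfl, ih h.2]

lemma bits_of_all_br (F : List Char) (h : F.all (fun c => c == '(' || c == ')') = true) :
    pvBitsOf F = F.map (fun c => if c == '(' then '1' else '0') := by
  induction F with
  | nil => rfl
  | cons c t ih =>
    simp only [List.all_cons, Bool.and_eq_true] at h
    have hc : c = '(' ∨ c = ')' := by simpa using h.1
    rcases hc with hc | hc <;> subst hc
    · rw [show pvBitsOf ('(' :: t) = '1' :: pvBitsOf t from rfl, ih h.2]; rfl
    · rw [show pvBitsOf (')' :: t) = '0' :: pvBitsOf t from rfl, ih h.2]; rfl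

lemma no_br_of_all_bits (F : List Char) (h : F.all (fun c => c == '0' || c == '1') = true) :
    F.any (fun c => c == '(' || c == ')') = false := by
  induction F with
  | nil => rfl
  | cons c t ih =>
    simp only [List.all_cons, Bool.and_eq_true] at h
    have hc : c = '0' ∨ c = '1' := by simpa using h.1
    rcases hc with hc | hc <;> (subst hc; simp [ih h.2])

lemma no_bits_of_all_br (F : List Char) (h : F.all (fun c => c == '(' || c == ')') = true) :
    F.any (fun c => c == '0' || c == '1') = false := by
  induction F with
  | nil => rfl
  | cons c t ih =>
    simp only [List.all_cons, Bool.and_eq_true] at h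
    have hc : c = '(' ∨ c = ')' := by simpa using h.1
    rcases hc with hc | hc <;> (subst hc; simp [ih h.2])

lemma no_invalid_of_valid (F : List Char)
    (h : F.all (fun c => c == '0' || c == '1') = true ∨ F.all (fun c => c == '(' || c == ')') = true) :
    F.filter (fun c => !(c == '0' || c == '1' || c == '(' || c == ')')) = [] := by
  induction F with
  | nil => rfl
  | cons c t ih =>
    rcases h with h | h <;> simp only [List.all_cons, Bool.and_eq_true] at h
    · have hc : c = '0' ∨ c = '1' := by simpa using h.1
      rcases hc with hc | hc <;> (subst hc; simpa using ih (Or.inl h.2))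
    · have hc : c = '(' ∨ c = ')' := by simpa using h.1
      rcases hc with hc | hc <;> (subst hc; simpa using ih (Or.inr h.2))

lemma not_all_bits_of_all_br (F : List Char) (hne : F ≠ [])
    (h : F.all (fun c => c == '(' || c == ')') = true) :
    F.all (fun c => c == '0' || c == '1') = false := by
  cases F with
  | nil => exact absurd rfl hne
  | cons c t =>
    simp only [List.all_cons, Bool.and_eq_true] at h
    have hc : c = '(' ∨ c = ')' := by simpa using h.1
    rcases hc with hc | hc <;> (subst hc; simp)

-- ===== VERDICT (by name: the statement is the Claim_ definition above) =====
theorem normalize_louds_py_spec : Claim_equal_normalize_louds_py := by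
  intro text _ hpre
  obtain ⟨hne, hcase⟩ := hpre
  unfold Spec_normalize_louds_py normalize_louds_py normalize_louds_py_alt
  rw [louds_fold]
  simp only [List.nil_append, no_invalid_of_valid _ hcase, List.foldl_nil, Bool.false_or]
  have hofl : (PySem.Set.ofList ([] : List Char)) = [] := rfl
  rcases hcase with h | h
  · have hbr := no_br_of_all_bits _ h
    rw [if_neg hne, if_neg hne, if_pos h, hbr, hofl]
    simp [bits_of_all_bits _ h]
  · have hbit := no_bits_of_all_br _ h
    have hnotall := not_all_bits_of_all_br _ hne h
    rw [if_neg hne, if_neg hne, hnotall, hbit, hofl, bits_of_all_br _ h]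
    rw [if_neg (by simp : ¬(false = true)), if_pos h, Bool.false_and]
    simp
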